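-- pv_equiv track=rewrite | github.com/EconForge/interpolation.py | interpolation/splines/gen_splines.py | print_expr
-- ===== SOURCE A (Python) =====
-- def print_expr(symbs, inds=[], multispline=False):
--     if len(symbs) == 0:
--         if multispline:
--             return 'coefs[{},k]'.format(str.join(',',['i{}+{}'.format(i,k) for i,k in enumerate(inds)]))
--         else:
--             return 'coefs[{}]'.format(str.join(',',['i{}+{}'.format(i,k) for i,k in enumerate(inds)]))
--     else:
--         h = symbs[0]
--         q = symbs[1:]
--         exprs = [  '{}_{}*({})'.format(h,i,print_expr(q,inds + [i], multispline=multispline)) for i in range(4)]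
--         return str.join( ' + ', exprs )
-- ===== SOURCE B (Python) =====
-- def print_expr(symbs, inds=[], multispline=False):
--     n = len(symbs)
--     # enumerate every index tuple, outermost index varying slowest
--     tuples = [[]]
--     for _ in range(n):
--         tuples = [t + [i] for t in tuples for i in range(4)]
--     # leaf coefficient strings
--     def leaf(t):
--         full = list(inds) + t
--         body = ','.join('i{}+{}'.format(j, k) for j, k in enumerate(full))
--         return 'coefs[' + body + (',k]' if multispline else ']')
--     exprs = [leaf(t) for t in tuples]
--     # fold bottom-up: combine chunks of 4 from the innermost symbol outward
--     for j in reversed(range(n)):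
--         exprs = [' + '.join('{}_{}*({})'.format(symbs[j], i, e)
--                             for i, e in enumerate(exprs[g:g + 4]))
--                  for g in range(0, len(exprs), 4)]
--     return exprs[0]
-- ===== Notes on version B (the rewrite author's own statement) =====
-- stated objective: alternative
-- what changed: B replaces A's top-down recursion by an iterative bottom-up build: it enumerates all 4^n index tuples, forms every leaf 'coefs[...]' string, then repeatedly combines chunks of 4 subexpressions from the innermost symbol outward until one string remains.
import Mathlib
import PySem

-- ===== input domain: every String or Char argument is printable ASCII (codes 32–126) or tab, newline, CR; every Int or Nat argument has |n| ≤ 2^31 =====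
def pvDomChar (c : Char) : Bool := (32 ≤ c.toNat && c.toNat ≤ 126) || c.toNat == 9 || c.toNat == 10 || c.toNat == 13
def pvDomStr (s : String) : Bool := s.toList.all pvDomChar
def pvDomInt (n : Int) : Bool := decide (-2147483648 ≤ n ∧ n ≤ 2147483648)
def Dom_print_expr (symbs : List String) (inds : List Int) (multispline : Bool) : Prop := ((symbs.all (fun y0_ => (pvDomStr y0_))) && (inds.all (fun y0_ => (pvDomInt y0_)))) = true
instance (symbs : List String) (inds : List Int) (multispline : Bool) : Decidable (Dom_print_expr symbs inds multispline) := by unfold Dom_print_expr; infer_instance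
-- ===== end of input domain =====

-- B builds the same expression iteratively bottom-up (all leaves, then chunk-of-4 folds) instead of A's top-down recursion; objective: alternative decomposition, same cost.

-- ===== PORT A =====
-- shared leaf builder: the 'coefs[...]' string A builds inline in its base case (B's leaf helper computes the same string)
def coefsLeaf (inds : List Int) (multispline : Bool) : String :=
  "coefs[" ++
    PySem.Str.join "," ((PySem.List.enumerate inds 0).map
      (fun p => "i" ++ PySem.Int.toStr p.1 ++ "+" ++ PySem.Int.toStr p.2)) ++
    (if multispline then ",k]" else "]")

def print_expr (symbs : List String) (inds : List Int) (multispline : Bool) : String :=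
  match symbs with
  | [] => coefsLeaf inds multispline
  | h :: q =>
      PySem.Str.join " + " ((PySem.List.pyRange 0 4 1).map
        (fun i => h ++ "_" ++ PySem.Int.toStr i ++ "*(" ++ print_expr q (inds ++ [i]) multispline ++ ")"))

-- ===== PORT B =====
-- one bottom-up combining step of Source B's loop body: each chunk of 4 subexpressions becomes one ' + '-joined expression
def pvStep (s : String) : List String → List String
  | a :: b :: c :: d :: rest =>
      PySem.Str.join " + " ((PySem.List.enumerate [a, b, c, d] 0).map
        (fun p => s ++ "_" ++ PySem.Int.toStr p.1 ++ "*(" ++ p.2 ++ ")")) :: pvStep s rest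
  | [] => []
  | rest =>  -- short final chunk (never reached: the expression list always has length 4^k)
      [PySem.Str.join " + " ((PySem.List.enumerate rest 0).map
        (fun p => s ++ "_" ++ PySem.Int.toStr p.1 ++ "*(" ++ p.2 ++ ")"))]

def print_expr_alt (symbs : List String) (inds : List Int) (multispline : Bool) : String :=
  let n := symbs.length
  -- enumerate every index tuple, outermost index varying slowest
  let tuples := (List.range n).foldl
    (fun ts _ => ts.flatMap (fun t => (PySem.List.pyRange 0 4 1).map (fun i => t ++ [i]))) [[]]
  -- leaf coefficient strings
  let exprs := tuples.map (fun t => coefsLeaf (inds ++ t) multispline)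
  -- fold bottom-up: combine chunks of 4 from the innermost symbol outward
  let exprs := ((List.range n).reverse).foldl (fun es j => pvStep (symbs.getD j "") es) exprs
  exprs.headD ""

-- ===== PRECONDITION & SPEC =====
def Spec_print_expr (symbs : List String) (inds : List Int) (multispline : Bool) (out : String) : Prop := out = print_expr_alt symbs inds multispline
instance (symbs : List String) (inds : List Int) (multispline : Bool) (out : String) : Decidable (Spec_print_expr symbs inds multispline out) := by unfold Spec_print_expr; infer_instance

-- ===== CLAIM (what is proved, stated in full; the proofs are below) =====
def Claim_equal_print_expr : Prop := ∀ (symbs : List String) (inds : List Int) (multispline : Bool), Dom_print_expr symbs inds multispline → Spec_print_expr symbs inds multispline (print_expr symbs inds multispline)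

-- ===== LEMMAS AND PROOFS =====

-- recursive view of B's index tuples: prepend form
def pvTuples : Nat → List (List Int)
  | 0 => [[]]
  | n + 1 => (PySem.List.pyRange 0 4 1).flatMap (fun i => (pvTuples n).map (fun t => i :: t))

-- recursive view of B's bottom-up loop: apply the steps for the tail symbols first, the head symbol last
def pvRunQ : List String → List String → List String
  | [], es => es
  | h :: q, es => pvStep h (pvRunQ q es)

lemma pvRange4 : PySem.List.pyRange 0 4 1 = [0, 1, 2, 3] := by decide

lemma pvTuples_succ_append (n : Nat) :
    (pvTuples n).flatMap (fun t => (PySem.List.pyRange 0 4 1).map (fun i => t ++ [i])) = pvTuples (n + 1) := by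
  induction n with
  | zero => rw [pvRange4]; decide
  | succ n ih =>
      show (pvTuples (n + 1)).flatMap _ = pvTuples (n + 1 + 1)
      rw [show pvTuples (n + 1) = (PySem.List.pyRange 0 4 1).flatMap (fun i => (pvTuples n).map (fun t => i :: t)) from rfl]
      rw [show pvTuples (n + 1 + 1) = (PySem.List.pyRange 0 4 1).flatMap (fun i => (pvTuples (n + 1)).map (fun t => i :: t)) from rfl]
      rw [← ih]
      simp [List.flatMap_assoc, List.map_flatMap, List.flatMap_map, Function.comp_def]

lemma pvTuples_foldl (n : Nat) :
    (List.range n).foldl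
      (fun ts _ => ts.flatMap (fun t => (PySem.List.pyRange 0 4 1).map (fun i => t ++ [i]))) [[]]
    = pvTuples n := by
  induction n with
  | zero => rfl
  | succ n ih => rw [List.range_succ, List.foldl_append, ih, List.foldl_cons, List.foldl_nil, pvTuples_succ_append]

lemma pvTuples_length (n : Nat) : (pvTuples n).length = 4 ^ n := by
  induction n with
  | zero => rfl
  | succ n ih => simp [pvTuples, pvRange4, ih]; ring

lemma pvStep_append (s : String) : ∀ (k : Nat) (xs ys : List String), xs.length = 4 * k →
    pvStep s (xs ++ ys) = pvStep s xs ++ pvStep s ys := by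
  intro k
  induction k with
  | zero => intro xs ys h; simp at h; simp [h, pvStep]
  | succ k ih =>
      intro xs ys h
      match xs with
      | a :: b :: c :: d :: rest =>
          simp only [List.length_cons] at h
          have hr : rest.length = 4 * k := by omega
          simp only [List.cons_append, pvStep, ih rest ys hr]
      | [] => simp at h
      | [a] => simp at h; omega
      | [a, b] => simp at h; omega
      | [a, b, c] => simp at h; omega

lemma pvStep_length (s : String) : ∀ (k : Nat) (xs : List String), xs.length = 4 * k →
    (pvStep s xs).length = k := by
  intro k
  induction k with
  | zero => intro xs h; simp at h; simp [h, pvStep]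
  | succ k ih =>
      intro xs h
      match xs with
      | a :: b :: c :: d :: rest =>
          simp only [List.length_cons] at h
          have hr : rest.length = 4 * k := by omega
          simp only [pvStep, List.length_cons, ih rest hr]
      | [] => simp at h
      | [a] => simp at h; omega
      | [a, b] => simp at h; omega
      | [a, b, c] => simp at h; omega

lemma pvRunQ_length : ∀ (q : List String) (k : Nat) (xs : List String),
    xs.length = 4 ^ q.length * k → (pvRunQ q xs).length = k := by
  intro q
  induction q with
  | nil => intro k xs h; simpa using h
  | cons h q ih =>
      intro k xs hx
      have : xs.length = 4 ^ q.length * (4 * k) := by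
        rw [hx, List.length_cons, pow_succ]; ring
      simpa [pvRunQ] using pvStep_length h k _ (ih (4 * k) xs this)

lemma pvRunQ_append : ∀ (q : List String) (k : Nat) (xs ys : List String),
    xs.length = 4 ^ q.length * k →
    pvRunQ q (xs ++ ys) = pvRunQ q xs ++ pvRunQ q ys := by
  intro q
  induction q with
  | nil => intro k xs ys h; rfl
  | cons h q ih =>
      intro k xs ys hx
      have hx' : xs.length = 4 ^ q.length * (4 * k) := by
        rw [hx, List.length_cons, pow_succ]; ring
      have hlen : (pvRunQ q xs).length = 4 * k := pvRunQ_length q (4 * k) xs hx'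
      simp only [pvRunQ, ih (4 * k) xs ys hx', pvStep_append h k _ _ hlen]

lemma pvCore : ∀ (q : List String) (inds : List Int) (m : Bool),
    pvRunQ q ((pvTuples q.length).map (fun t => coefsLeaf (inds ++ t) m)) = [print_expr q inds m] := by
  intro q
  induction q with
  | nil => intro inds m; simp [pvTuples, pvRunQ, print_expr]
  | cons h q ih =>
      intro inds m
      have hsplit : (pvTuples (h :: q).length).map (fun t => coefsLeaf (inds ++ t) m)
          = ((pvTuples q.length).map (fun t => coefsLeaf ((inds ++ [0]) ++ t) m))
            ++ (((pvTuples q.length).map (fun t => coefsLeaf ((inds ++ [1]) ++ t) m))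
            ++ (((pvTuples q.length).map (fun t => coefsLeaf ((inds ++ [2]) ++ t) m))
            ++ ((pvTuples q.length).map (fun t => coefsLeaf ((inds ++ [3]) ++ t) m)))) := by
        show (pvTuples (q.length + 1)).map _ = _
        rw [show pvTuples (q.length + 1) = (PySem.List.pyRange 0 4 1).flatMap (fun i => (pvTuples q.length).map (fun t => i :: t)) from rfl, pvRange4]
        simp [List.flatMap_cons, List.map_map, Function.comp_def, List.append_assoc]
      have hlen : ∀ i : Int, ((pvTuples q.length).map (fun t => coefsLeaf ((inds ++ [i]) ++ t) m)).length
          = 4 ^ q.length * 1 := by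
        intro i; simp [pvTuples_length]
      rw [show pvRunQ (h :: q) ((pvTuples (h :: q).length).map (fun t => coefsLeaf (inds ++ t) m))
            = pvStep h (pvRunQ q ((pvTuples (h :: q).length).map (fun t => coefsLeaf (inds ++ t) m))) from rfl]
      rw [hsplit]
      rw [pvRunQ_append q 1 _ _ (hlen 0), pvRunQ_append q 1 _ _ (hlen 1), pvRunQ_append q 1 _ _ (hlen 2)]
      rw [ih (inds ++ [0]) m, ih (inds ++ [1]) m, ih (inds ++ [2]) m, ih (inds ++ [3]) m]
      show pvStep h [print_expr q (inds ++ [0]) m, print_expr q (inds ++ [1]) m,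
            print_expr q (inds ++ [2]) m, print_expr q (inds ++ [3]) m] = [print_expr (h :: q) inds m]
      rw [show print_expr (h :: q) inds m
            = PySem.Str.join " + " ((PySem.List.pyRange 0 4 1).map
                (fun i => h ++ "_" ++ PySem.Int.toStr i ++ "*(" ++ print_expr q (inds ++ [i]) m ++ ")")) from rfl,
          pvRange4]
      simp [pvStep, PySem.List.enumerate]

lemma pvFoldlRev : ∀ (symbs : List String) (es : List String),
    ((List.range symbs.length).reverse).foldl (fun es j => pvStep (symbs.getD j "") es) es
    = pvRunQ symbs es := by
  intro symbs
  induction symbs with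
  | nil => intro es; rfl
  | cons h q ih =>
      intro es
      rw [show (h :: q).length = q.length + 1 from rfl, List.range_succ_eq_map, List.reverse_cons, ← List.map_reverse,
        List.foldl_append, List.foldl_map]
      have : (List.range q.length).reverse.foldl
          (fun es j => pvStep ((h :: q).getD (j + 1) "") es) es
          = pvRunQ q es := by
        have := ih es
        simpa using this
      rw [this]
      rfl

-- ===== VERDICT (by name: the statement is the Claim_ definition above) =====
theorem print_expr_spec : Claim_equal_print_expr := by
  intro symbs inds multispline _
  show print_expr symbs inds multispline = print_expr_alt symbs inds multispline
  rw [print_expr_alt, pvTuples_foldl, pvFoldlRev, pvCore]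
  rfl
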